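-- pv_equiv track=rewrite | github.com/N1cecode/IEEEXtreme | 18.0/Sierpinski/cal_edge.py | calculate_powers
-- ===== SOURCE A (Python) =====
-- def calculate_powers(limit=10**9):
--     result = []
--     n = 0
--     while True:
--         value = 3 * (2 ** n)
--         if value > limit:
--             break
--         result.append(value)
--         n += 1
--     return result
-- ===== SOURCE B (Python) =====
-- def calculate_powers(limit=10**9):
--     m = limit // 3
--     if m < 1:
--         return []
--     return [3 * 2 ** n for n in range(m.bit_length())]
-- ===== Notes on version B (the rewrite author's own statement) =====
-- stated objective: simpler
-- what changed: Replaces the unbounded while-loop with a closed-form term count (bit_length of limit//3) and a single comprehension.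
import Mathlib
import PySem

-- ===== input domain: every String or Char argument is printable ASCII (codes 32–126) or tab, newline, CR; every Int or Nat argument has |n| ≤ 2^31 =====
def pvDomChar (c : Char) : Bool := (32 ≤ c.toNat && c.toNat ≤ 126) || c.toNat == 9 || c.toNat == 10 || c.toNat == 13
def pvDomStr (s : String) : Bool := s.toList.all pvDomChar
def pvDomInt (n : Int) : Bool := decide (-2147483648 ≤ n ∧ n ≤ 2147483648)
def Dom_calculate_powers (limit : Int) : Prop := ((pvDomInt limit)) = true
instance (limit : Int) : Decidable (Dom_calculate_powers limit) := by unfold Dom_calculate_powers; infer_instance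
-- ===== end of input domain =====

-- B replaces A's unbounded while-loop with a closed-form term count (bit_length of limit//3)
-- plus one comprehension; same return value, similar cost ("simpler").

-- ===== PORT A =====
-- literal port of A's while-True loop: append 3*2^n while it does not exceed limit
def cpLoop (limit : Int) (n : Nat) (result : List Int) : List Int :=
  if 3 * (2:Int)^n > limit then result
  else cpLoop limit (n+1) (result ++ [3 * (2:Int)^n])
termination_by (limit + 1 - 3 * (2:Int)^n).toNat
decreasing_by
  have hp : (0:Int) < 2^n := pow_pos (by norm_num) n
  have _h2 : (2:Int)^(n+1) = 2^n * 2 := pow_succ 2 n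
  omega

def calculate_powers (limit : Int) : List Int := cpLoop limit 0 []

-- ===== PORT B =====
def calculate_powers_alt (limit : Int) : List Int :=
  let m := PySem.Int.floordiv limit 3
  if m < 1 then []
  else (List.range (PySem.Int.bitLength m)).map (fun n => 3 * (2:Int)^n)

-- ===== PRECONDITION & SPEC =====
def Spec_calculate_powers (limit : Int) (out : List Int) : Prop := out = calculate_powers_alt limit
instance (limit : Int) (out : List Int) : Decidable (Spec_calculate_powers limit out) := by unfold Spec_calculate_powers; infer_instance

-- ===== CLAIM (what is proved, stated in full; the proofs are below) =====
def Claim_equal_calculate_powers : Prop := ∀ (limit : Int), Dom_calculate_powers limit → Spec_calculate_powers limit (calculate_powers limit)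

-- ===== LEMMAS AND PROOFS =====

-- the loop, started at n with accumulator acc, appends the terms for exponents n, n+1, …, K-1
lemma cpLoop_eq (limit : Int) (K : Nat)
    (hK : ∀ n : Nat, 3 * (2:Int)^n ≤ limit ↔ n < K) :
    ∀ d n acc, K - n ≤ d →
      cpLoop limit n acc = acc ++ (List.range (K - n)).map (fun i => 3 * (2:Int)^(n+i)) := by
  intro d
  induction d with
  | zero =>
    intro n acc h
    have hKn : ¬ n < K := by omega
    have hgt : ¬ (3 * (2:Int)^n ≤ limit) := fun hc => hKn ((hK n).1 hc)
    rw [cpLoop, if_pos (by omega)]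
    simp [Nat.sub_eq_zero_of_le (by omega : K ≤ n)]
  | succ d ih =>
    intro n acc h
    by_cases hlt : n < K
    · have hle : 3 * (2:Int)^n ≤ limit := (hK n).2 hlt
      rw [cpLoop, if_neg (by omega)]
      rw [ih (n+1) (acc ++ [3 * (2:Int)^n]) (by omega)]
      have hr : K - n = (K - (n+1)) + 1 := by omega
      rw [hr, List.range_succ_eq_map, List.map_cons, List.map_map]
      have hf : ((fun i => 3 * (2:Int)^(n+i)) ∘ (· + 1)) = (fun i => 3 * (2:Int)^((n+1)+i)) := by
        funext i
        have he : n + (i + 1) = (n + 1) + i := by omega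
        simp only [Function.comp]
        rw [he]
      simp [hf]
    · have hgt : ¬ (3 * (2:Int)^n ≤ limit) := fun hc => hlt ((hK n).1 hc)
      rw [cpLoop, if_pos (by omega)]
      simp [Nat.sub_eq_zero_of_le (by omega : K ≤ n)]

-- bit_length characterisation on positive integers: n < bitLength m ↔ 2^n ≤ m
lemma lt_bitLength_iff (m : Int) (hm : 1 ≤ m) (n : Nat) :
    n < PySem.Int.bitLength m ↔ (2:Int)^n ≤ m := by
  have hm0 : m ≠ 0 := by omega
  have hub : m.natAbs < 2 ^ PySem.Int.bitLength m := PySem.Int.lt_two_pow_bitLength m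
  have hlb : 2 ^ (PySem.Int.bitLength m - 1) ≤ m.natAbs := PySem.Int.two_pow_bitLength_le m hm0
  have hcast : ((m.natAbs : Int)) = m := Int.natAbs_of_nonneg (by omega)
  constructor
  · intro hn
    have h1 : (2:Nat)^n ≤ 2 ^ (PySem.Int.bitLength m - 1) :=
      Nat.pow_le_pow_right (by norm_num) (by omega)
    have h2 : (2:Nat)^n ≤ m.natAbs := le_trans h1 hlb
    calc (2:Int)^n = ((2^n : Nat) : Int) := by push_cast; ring
      _ ≤ (m.natAbs : Int) := by exact_mod_cast h2
      _ = m := hcast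
  · intro hn
    have h2 : (2:Nat)^n ≤ m.natAbs := by
      have : ((2^n : Nat) : Int) ≤ (m.natAbs : Int) := by rw [hcast]; push_cast; linarith
      exact_mod_cast this
    have : (2:Nat)^n < 2 ^ PySem.Int.bitLength m := lt_of_le_of_lt h2 hub
    exact (Nat.pow_lt_pow_iff_right (by norm_num)).1 this

-- ===== VERDICT (by name: the statement is the Claim_ definition above) =====
theorem calculate_powers_spec : Claim_equal_calculate_powers := by
  intro limit _
  unfold Spec_calculate_powers calculate_powers calculate_powers_alt
  by_cases hm : PySem.Int.floordiv limit 3 < 1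
  · -- limit < 3 : both sides empty
    have hlim : limit < 3 := by
      have := (PySem.Int.floordiv_lt_iff_lt_mul (a := limit) (b := 3) (q := 1) (by norm_num)).1 hm
      omega
    have hK : ∀ n : Nat, 3 * (2:Int)^n ≤ limit ↔ n < 0 := by
      intro n
      have hp : (1:Int) ≤ 2^n := one_le_pow₀ (by norm_num)
      constructor
      · intro h; nlinarith
      · omega
    rw [cpLoop_eq limit 0 hK 0 0 [] (by omega)]
    rw [if_pos hm]
    simp
  · -- limit ≥ 3 : the loop runs exactly bitLength (limit//3) times
    set m := PySem.Int.floordiv limit 3 with hmdef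
    have hm1 : 1 ≤ m := by omega
    have hK : ∀ n : Nat, 3 * (2:Int)^n ≤ limit ↔ n < PySem.Int.bitLength m := by
      intro n
      rw [lt_bitLength_iff m hm1 n, hmdef,
          PySem.Int.le_floordiv_iff_mul_le (by norm_num : (0:Int) < 3)]
      constructor <;> intro h <;> linarith
    rw [cpLoop_eq limit (PySem.Int.bitLength m) hK (PySem.Int.bitLength m) 0 [] (by omega)]
    rw [if_neg hm]
    simp
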